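-- pv_equiv track=rewrite | github.com/aminekebouche/Cluster-Editing | src/mainOptilio.py | arete_ajout_supp
-- ===== SOURCE A (Python) =====
-- def arete_ajout_supp(graph,cluster):
--     list_arret_modif = set()
--     for sommet in graph:
--         s = graph[sommet]
--         s.add(sommet)
--         for r in cluster:
--             if sommet in r :
--                 for voisin in (s-r):
--                     arete_supp = tuple(sorted((sommet,voisin)))
--                     list_arret_modif.add(arete_supp)
--                 for voisin_nouv in (r-s):
--                     arete_ajout = tuple(sorted((sommet,voisin_nouv)))
--                     list_arret_modif.add(arete_ajout)
--
--     return list_arret_modif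
-- ===== SOURCE B (Python) =====
-- def arete_ajout_supp(graph, cluster):
--     # same argument mutation as A: every vertex joins its own neighbour set
--     for v in graph:
--         graph[v].add(v)
--     # index built once: vertex -> list of the clusters containing it (in cluster order),
--     # so the per-vertex scan over every cluster disappears
--     member = {}
--     for r in cluster:
--         for v in r:
--             member.setdefault(v, []).append(r)
--     out = set()
--     for u, s in graph.items():
--         for r in member.get(u, []):
--             for w in s ^ r:
--                 out.add((u, w) if u <= w else (w, u))
--     return out
-- ===== Notes on version B (the rewrite author's own statement) =====
-- stated objective: faster
-- what changed: B replaces A's per-vertex scan over every cluster (a membership test for each vertex-cluster pair) by a vertex-to-clusters index built in one pass over the clusters, then emits each vertex's edits directly from its index entry via the symmetric difference.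
import Mathlib
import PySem

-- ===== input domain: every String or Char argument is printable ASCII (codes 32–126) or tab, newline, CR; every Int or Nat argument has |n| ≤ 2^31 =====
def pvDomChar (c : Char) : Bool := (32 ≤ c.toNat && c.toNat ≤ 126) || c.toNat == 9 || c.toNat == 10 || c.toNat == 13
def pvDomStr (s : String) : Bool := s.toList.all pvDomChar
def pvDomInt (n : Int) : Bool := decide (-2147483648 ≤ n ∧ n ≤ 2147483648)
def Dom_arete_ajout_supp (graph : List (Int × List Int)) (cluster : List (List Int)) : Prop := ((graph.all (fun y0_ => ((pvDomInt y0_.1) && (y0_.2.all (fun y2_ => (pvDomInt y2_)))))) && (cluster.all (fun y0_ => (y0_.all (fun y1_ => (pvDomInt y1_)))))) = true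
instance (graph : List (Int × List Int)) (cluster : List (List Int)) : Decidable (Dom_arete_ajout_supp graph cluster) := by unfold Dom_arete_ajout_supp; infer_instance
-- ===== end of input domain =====

-- B builds a vertex→clusters index in one pass so A's per-vertex scan over every cluster
-- disappears (objective: faster for many clusters). Both A and B mutate the argument by
-- adding each vertex to its own neighbour set; the equivalence proved is about the RETURN value.

-- ===== PORT A =====
def arete_ajout_supp (graph : List (Int × List Int)) (cluster : List (List Int)) : List (List Int) :=
  graph.foldl (fun list_arret_modif p =>
    let sommet := p.1
    let s := PySem.Set.add (PySem.Set.ofList p.2) sommet   -- s = graph[sommet]; s.add(sommet)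
    cluster.foldl (fun acc rl =>
      let r := PySem.Set.ofList rl
      if PySem.Set.contains r sommet then
        let acc := (PySem.Set.diff s r).foldl
          (fun a voisin => PySem.Set.add a (PySem.List.sorted [sommet, voisin] (fun x => x) false)) acc
        (PySem.Set.diff r s).foldl
          (fun a voisin_nouv => PySem.Set.add a (PySem.List.sorted [sommet, voisin_nouv] (fun x => x) false)) acc
      else acc) list_arret_modif) PySem.Set.empty

-- ===== PORT B =====
def arete_ajout_supp_alt (graph : List (Int × List Int)) (cluster : List (List Int)) : List (List Int) :=
  -- for v in graph: graph[v].add(v)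
  let graph' := graph.map (fun p => (p.1, PySem.Set.add (PySem.Set.ofList p.2) p.1))
  -- member = {}; for r in cluster: for v in r: member.setdefault(v, []).append(r)
  let member : PySem.Dict Int (List (List Int)) :=
    cluster.foldl (fun d rl =>
      let r := PySem.Set.ofList rl
      r.foldl (fun d v => PySem.Dict.modify d v [] (· ++ [r])) d) PySem.Dict.empty
  -- out = set(); for u, s in graph.items(): for r in member.get(u, []): for w in s ^ r: out.add(min/max pair)
  graph'.foldl (fun out p =>
    (PySem.Dict.getD member p.1 []).foldl (fun out r =>
      (PySem.Set.symmDiff p.2 r).foldl (fun out w =>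
        PySem.Set.add out (if p.1 ≤ w then [p.1, w] else [w, p.1])) out) out) PySem.Set.empty

-- ===== PRECONDITION & SPEC =====
def Spec_arete_ajout_supp (graph : List (Int × List Int)) (cluster : List (List Int)) (out : List (List Int)) : Prop := out = arete_ajout_supp_alt graph cluster
instance (graph : List (Int × List Int)) (cluster : List (List Int)) (out : List (List Int)) : Decidable (Spec_arete_ajout_supp graph cluster out) := by unfold Spec_arete_ajout_supp; infer_instance

-- ===== CLAIM (what is proved, stated in full; the proofs are below) =====
def Claim_equal_arete_ajout_supp : Prop := ∀ (graph : List (Int × List Int)) (cluster : List (List Int)), Dom_arete_ajout_supp graph cluster → Spec_arete_ajout_supp graph cluster (arete_ajout_supp graph cluster)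

-- ===== LEMMAS AND PROOFS =====

-- tuple(sorted((u, w))) for two ints is B's (min, max) pair
theorem sorted_pair (u w : Int) :
    PySem.List.sorted [u, w] (fun x => x) false = if u ≤ w then [u, w] else [w, u] := by
  simp only [PySem.List.sorted, if_neg (by decide : ¬ false = true), List.foldl_cons,
    List.foldl_nil, PySem.List.insertBy]
  split_ifs <;> simp only [decide_eq_true_eq] at * <;> first | rfl | omega

-- folding over a flatMap is the nested fold
theorem foldl_flatMap {α β γ : Type} (f : α → β → α) (g : γ → List β) :
    ∀ (l : List γ) (acc : α),
      (l.flatMap g).foldl f acc = l.foldl (fun a c => (g c).foldl f a) acc := by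
  intro l
  induction l with
  | nil => intro acc; rfl
  | cons x t ih => intro acc; simp [List.flatMap_cons, List.foldl_append, ih]

-- in a duplicate-free list, filtering for one element keeps at most that element
theorem filter_beq_of_nodup (l : List Int) (h : l.Nodup) (u : Int) :
    l.filter (· == u) = if u ∈ l then [u] else [] := by
  induction l with
  | nil => simp
  | cons x t ih =>
    rcases List.nodup_cons.mp h with ⟨hx, ht⟩
    by_cases hxu : x = u
    · subst hxu
      have hnil : List.filter (· == x) t = [] :=
        List.filter_eq_nil_iff.mpr (fun b hb => by
          simp only [beq_iff_eq]; rintro rfl; exact hx hb)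
      simp [hnil]
    · simp only [List.filter_cons, beq_iff_eq, if_neg hxu, ih ht, List.mem_cons]
      by_cases hu : u ∈ t <;> simp [hu, Ne.symm hxu]

-- filtering the (vertex, cluster) pair stream for u keeps u's clusters, in order
theorem pairs_filter (cluster : List (List Int)) (u : Int) :
    ((cluster.flatMap (fun rl =>
        (PySem.Set.ofList rl).map (fun v => (v, PySem.Set.ofList rl)))).filter
          (fun p => p.1 == u)).map (fun x => x.2)
    = (cluster.filter (fun rl => PySem.Set.contains (PySem.Set.ofList rl) u)).map
        PySem.Set.ofList := by
  induction cluster with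
  | nil => rfl
  | cons rl t ih =>
    rw [List.flatMap_cons, List.filter_append, List.map_append, ih, List.filter_map]
    have hcomp : ((fun (p : Int × List Int) => p.1 == u) ∘
        fun v => (v, PySem.Set.ofList rl)) = (· == u) := rfl
    rw [hcomp, filter_beq_of_nodup _ (PySem.Set.nodup_ofList rl) u]
    by_cases hu : u ∈ rl
    · have hm : u ∈ PySem.Set.ofList rl := (PySem.Set.mem_ofList _ _).mpr hu
      simp [hm, hu]
    · have hm : u ∉ PySem.Set.ofList rl := fun h => hu ((PySem.Set.mem_ofList _ _).mp h)
      simp [hm, hu]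

-- the index lists the clusters containing u, in cluster order
theorem member_getD (cluster : List (List Int)) (u : Int) :
    (cluster.foldl (fun d rl =>
        let r := PySem.Set.ofList rl
        r.foldl (fun d v => PySem.Dict.modify d v [] (· ++ [r])) d)
      PySem.Dict.empty).getD u []
    = (cluster.filter (fun rl => PySem.Set.contains (PySem.Set.ofList rl) u)).map
        PySem.Set.ofList := by
  have hpairs :
      cluster.foldl (fun d rl =>
        let r := PySem.Set.ofList rl
        r.foldl (fun d v => PySem.Dict.modify d v [] (· ++ [r])) d) PySem.Dict.empty
      = (cluster.flatMap (fun rl =>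
          (PySem.Set.ofList rl).map (fun v => (v, PySem.Set.ofList rl)))).foldl
          (fun d p => PySem.Dict.modify d p.1 [] (· ++ [p.2])) PySem.Dict.empty := by
    rw [foldl_flatMap]
    refine PySem.List.foldl_congr_mem _ _ _ _ (fun acc rl _ => ?_)
    rw [List.foldl_map]
  rw [hpairs, PySem.Dict.getD_foldl_modify_append]
  simp only [PySem.Dict.getD_empty, List.nil_append]
  exact pairs_filter cluster u

-- per vertex, A's cluster scan emits exactly what B emits from the index entry
theorem inner_eq (u : Int) (s : PySem.Set Int) (cluster : List (List Int))
    (acc : List (List Int)) :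
    cluster.foldl (fun acc rl =>
      let r := PySem.Set.ofList rl
      if PySem.Set.contains r u then
        let acc := (PySem.Set.diff s r).foldl
          (fun a v => PySem.Set.add a (PySem.List.sorted [u, v] (fun x => x) false)) acc
        (PySem.Set.diff r s).foldl
          (fun a v => PySem.Set.add a (PySem.List.sorted [u, v] (fun x => x) false)) acc
      else acc) acc
    = ((cluster.filter (fun rl => PySem.Set.contains (PySem.Set.ofList rl) u)).map
        PySem.Set.ofList).foldl (fun out r =>
          (PySem.Set.symmDiff s r).foldl (fun out w =>
            PySem.Set.add out (if u ≤ w then [u, w] else [w, u])) out) acc := by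
  rw [List.foldl_map, ← PySem.List.foldl_if_eq_foldl_filter]
  refine PySem.List.foldl_congr_mem _ _ _ _ (fun a rl _ => ?_)
  by_cases hm : u ∈ rl
  · have hc : PySem.Set.contains (PySem.Set.ofList rl) u = true :=
      (PySem.Set.contains_iff _ _).mpr ((PySem.Set.mem_ofList _ _).mpr hm)
    simp only [hc, if_true]
    show _ = ((PySem.Set.diff s _ ++ PySem.Set.diff _ s).foldl _ a)
    rw [List.foldl_append]
    simp only [sorted_pair]
  · have hc : PySem.Set.contains (PySem.Set.ofList rl) u = false := by
      cases hE : PySem.Set.contains (PySem.Set.ofList rl) u with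
      | false => rfl
      | true => exact absurd ((PySem.Set.mem_ofList _ _).mp ((PySem.Set.contains_iff _ _).mp hE)) hm
    simp only [hc, Bool.false_eq_true, if_false]

theorem arete_ajout_supp_eq (graph : List (Int × List Int)) (cluster : List (List Int)) :
    arete_ajout_supp graph cluster = arete_ajout_supp_alt graph cluster := by
  unfold arete_ajout_supp arete_ajout_supp_alt
  rw [List.foldl_map]
  refine PySem.List.foldl_congr_mem _ _ _ _ (fun acc p _ => ?_)
  rw [member_getD cluster p.1]
  exact inner_eq p.1 (PySem.Set.add (PySem.Set.ofList p.2) p.1) cluster acc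

-- ===== VERDICT (by name: the statement is the Claim_ definition above) =====
theorem arete_ajout_supp_spec : Claim_equal_arete_ajout_supp := by
  intro graph cluster _
  exact arete_ajout_supp_eq graph cluster
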